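-- pv_equiv track=rewrite | github.com/somyeong0623/JAVA_AlgorithmStudy | src/week13/programmers_Joystick/CJW.py | word_distance
-- ===== SOURCE A (Python) =====
-- def word_distance(name, pos):  # 문자열끼리의 최소 길이
--     d1 = 0
--     for i in range(len(name) - 1):
--         if name[(pos + i + 1) % len(name)] != 'A':
--             d1 = i + 1
--             break
--
--     d2 = 0
--     for i in range(len(name) - 1):
--         if name[(pos - i - 1) % len(name)] != 'A':
--             d2 = i + 1
--             break
--
--     return 0 if d1 == d2 else - 1 * d2 if d1 > d2 else d1
-- ===== SOURCE B (Python) =====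
-- def word_distance(name, pos):
--     n = len(name)
--     idx = [i for i, c in enumerate(name) if c != 'A' and i != pos % n]
--     if not idx:
--         return 0
--     d1 = min((i - pos) % n for i in idx)
--     d2 = min((pos - i) % n for i in idx)
--     return 0 if d1 == d2 else -1 * d2 if d1 > d2 else d1
-- ===== Notes on version B (the rewrite author's own statement) =====
-- stated objective: alternative
-- what changed: A's two directional early-break scans over range(len(name)-1) are replaced by building the list of non-'A' candidate indices once (excluding pos % n) and taking the minimum of the modular distances (i-pos) % n and (pos-i) % n over it; the final combine is kept.
import Mathlib
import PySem

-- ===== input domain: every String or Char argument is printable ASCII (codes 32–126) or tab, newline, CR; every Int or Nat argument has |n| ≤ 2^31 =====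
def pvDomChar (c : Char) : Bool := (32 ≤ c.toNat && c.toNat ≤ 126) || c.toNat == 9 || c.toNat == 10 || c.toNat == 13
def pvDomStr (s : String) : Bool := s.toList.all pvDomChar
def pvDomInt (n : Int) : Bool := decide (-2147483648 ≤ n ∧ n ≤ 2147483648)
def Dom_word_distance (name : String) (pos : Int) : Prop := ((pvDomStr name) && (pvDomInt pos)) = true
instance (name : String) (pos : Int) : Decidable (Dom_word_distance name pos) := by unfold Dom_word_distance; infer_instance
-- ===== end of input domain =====

-- B replaces A's two early-break directional scans by collecting the non-'A' indices once and taking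
-- two mins of modular distances (objective: alternative decomposition, same asymptotic cost).

-- ===== PORT A =====
-- the early-break 'for i in range(len(name)-1)' loop of A (g i = the index tested at loop variable i)
def wdScan (cs : List Char) (g : Int → Int) : List Int → Int
  | [] => 0
  | i :: rest => if PySem.List.pyGet? cs (g i) != some 'A' then i + 1 else wdScan cs g rest

def word_distance (name : String) (pos : Int) : Int :=
  let cs := name.toList
  let n : Int := PySem.List.len cs
  let d1 := wdScan cs (fun i => PySem.Int.mod (pos + i + 1) n) (PySem.List.pyRange 0 (n - 1) 1)
  let d2 := wdScan cs (fun i => PySem.Int.mod (pos - i - 1) n) (PySem.List.pyRange 0 (n - 1) 1)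
  if d1 == d2 then 0 else if d1 > d2 then -1 * d2 else d1

-- ===== PORT B =====
-- the candidate-index list [i for i, c in enumerate(name) if c != 'A' and i != pos % n]
def wdIdx (cs : List Char) (pos : Int) : List Int :=
  ((PySem.List.enumerate cs 0).filter
    (fun p => p.2 != 'A' && p.1 != PySem.Int.mod pos (PySem.List.len cs))).map (·.1)

def word_distance_alt (name : String) (pos : Int) : Int :=
  let cs := name.toList
  let n : Int := PySem.List.len cs
  let idx := wdIdx cs pos
  if idx = [] then 0
  else
    let d1 := (PySem.List.min? (idx.map (fun i => PySem.Int.mod (i - pos) n)) (fun x => x)).getD 0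
    let d2 := (PySem.List.min? (idx.map (fun i => PySem.Int.mod (pos - i) n)) (fun x => x)).getD 0
    if d1 == d2 then 0 else if d1 > d2 then -1 * d2 else d1

-- ===== PRECONDITION & SPEC =====
def Spec_word_distance (name : String) (pos : Int) (out : Int) : Prop := out = word_distance_alt name pos
instance (name : String) (pos : Int) (out : Int) : Decidable (Spec_word_distance name pos out) := by unfold Spec_word_distance; infer_instance

-- ===== CLAIM (what is proved, stated in full; the proofs are below) =====
def Claim_equal_word_distance : Prop := ∀ (name : String) (pos : Int), Dom_word_distance name pos → Spec_word_distance name pos (word_distance name pos)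

-- ===== LEMMAS AND PROOFS =====

-- the character test A performs at (directed) distance k from pos: s = 1 forwards, s = -1 backwards
def wdQ (cs : List Char) (pos s : Int) (k : Int) : Bool :=
  PySem.List.pyGet? cs (PySem.Int.mod (pos + s * k) (PySem.List.len cs)) != some 'A'

-- wdScan is a find?-with-default over its index list
theorem wdScan_eq_find? (cs : List Char) (g : Int → Int) (is : List Int) :
    wdScan cs g is
      = ((is.find? (fun i => PySem.List.pyGet? cs (g i) != some 'A')).map (· + 1)).getD 0 := by
  induction is with
  | nil => simp [wdScan]
  | cons i rest ih =>
    by_cases h : (PySem.List.pyGet? cs (g i) != some 'A') = true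
    · simp [wdScan, h]
    · rw [Bool.not_eq_true] at h
      simp [wdScan, h, ih]

theorem mem_wdIdx (cs : List Char) (pos i : Int) :
    i ∈ wdIdx cs pos ↔ ∃ (k : Nat) (h : k < cs.length),
      i = (k : Int) ∧ cs[k] ≠ 'A' ∧ (k : Int) ≠ PySem.Int.mod pos cs.length := by
  unfold wdIdx
  simp only [List.mem_map, List.mem_filter, PySem.List.mem_enumerate_iff, PySem.List.len_eq,
    Bool.and_eq_true, bne_iff_ne, ne_eq]
  constructor
  · rintro ⟨p, ⟨⟨k, hk, rfl⟩, hc, hp⟩, rfl⟩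
    refine ⟨k, hk, by simp, by simpa using hc, by simpa using hp⟩
  · rintro ⟨k, hk, rfl, hc, hp⟩
    exact ⟨((k : Int), cs[k]), ⟨⟨k, hk, by simp⟩, by simpa using hc, by simpa using hp⟩, rfl⟩
theorem modkey (n pos i s : Int) (hss : s * s = 1) :
    (pos + s * ((s * (i - pos)) % n)) % n = i % n := by
  rw [Int.emod_def (s * (i - pos)) n]
  have h : pos + s * (s * (i - pos) - n * (s * (i - pos) / n))
      = (pos + (s * s) * (i - pos)) - n * (s * (s * (i - pos) / n)) := by ring
  rw [h, hss, Int.sub_mul_emod_self_left]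
  ring_nf
theorem modkey2 (n pos k s : Int) (hss : s * s = 1) :
    (s * ((pos + s * k) % n - pos)) % n = k % n := by
  rw [Int.emod_def (pos + s * k) n]
  have h : s * (pos + s * k - n * ((pos + s * k) / n) - pos)
      = (s * s) * k - n * (s * ((pos + s * k) / n)) := by ring
  rw [h, hss, Int.sub_mul_emod_self_left]
  ring_nf
theorem dvd_of_smul (n x s : Int) (hss : s * s = 1) (h : n ∣ s * x) : n ∣ x := by
  have := Dvd.dvd.mul_left h s
  rwa [← mul_assoc, hss, one_mul] at this

theorem bridgeB (cs : List Char) (pos s m : Int) (hs : s = 1 ∨ s = -1)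
    (hm : m ∈ (wdIdx cs pos).map (fun i => PySem.Int.mod (s * (i - pos)) (PySem.List.len cs))) :
    (1 ≤ m ∧ m < PySem.List.len cs) ∧ wdQ cs pos s m = true := by
  have hss : s * s = 1 := by rcases hs with rfl | rfl <;> norm_num
  obtain ⟨i, hi, rfl⟩ := List.mem_map.mp hm
  obtain ⟨k, hk, rfl, hcA, hne⟩ := (mem_wdIdx cs pos i).mp hi
  simp only [PySem.List.len_eq] at *
  set n : Int := (cs.length : Int) with hndef
  have hk' : (k : Int) < n := by rw [hndef]; exact_mod_cast hk
  have hn : (0 : Int) < n := by omega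
  rw [PySem.Int.mod_eq_emod_of_pos hn] at hne ⊢
  set x : Int := (s * ((k : Int) - pos)) % n with hx
  have hx0 : 0 ≤ x := Int.emod_nonneg _ (by omega)
  have hxlt : x < n := Int.emod_lt_of_pos _ hn
  have hkn : (k : Int) % n = (k : Int) := Int.emod_eq_of_lt (by positivity) hk'
  have hxne : x ≠ 0 := by
    intro h0
    have hdvd : n ∣ (k : Int) - pos := dvd_of_smul n _ s hss (Int.dvd_of_emod_eq_zero (hx ▸ h0))
    have : (k : Int) % n = pos % n := Int.emod_eq_emod_iff_emod_sub_eq_zero.mpr (Int.emod_eq_zero_of_dvd hdvd)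
    exact hne (hkn ▸ this)
  have hkey : (pos + s * x) % n = (k : Int) := by
    rw [hx, modkey n pos (k : Int) s hss, hkn]
  refine ⟨⟨by omega, hxlt⟩, ?_⟩
  unfold wdQ
  simp only [PySem.List.len_eq]
  rw [PySem.Int.mod_eq_emod_of_pos hn, hkey]
  rw [PySem.List.pyGet?_eq_some_getElem cs (by positivity) (by rw [← hndef]; exact hk')]
  simpa using hcA

theorem bridgeA (cs : List Char) (pos s k : Int) (hs : s = 1 ∨ s = -1)
    (h1 : 1 ≤ k) (h2 : k < PySem.List.len cs) (hq : wdQ cs pos s k = true) :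
    k ∈ (wdIdx cs pos).map (fun i => PySem.Int.mod (s * (i - pos)) (PySem.List.len cs)) := by
  have hss : s * s = 1 := by rcases hs with rfl | rfl <;> norm_num
  unfold wdQ at hq
  simp only [PySem.List.len_eq] at *
  set n : Int := (cs.length : Int) with hndef
  have hn : (0 : Int) < n := by omega
  rw [PySem.Int.mod_eq_emod_of_pos hn] at hq
  set j : Int := (pos + s * k) % n with hj
  have hj0 : 0 ≤ j := Int.emod_nonneg _ (by omega)
  have hjlt : j < n := Int.emod_lt_of_pos _ hn
  have hjnat : j = ((j.toNat : Nat) : Int) := by omega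
  have hjlen : j.toNat < cs.length := by omega
  have hcA : cs[j.toNat] ≠ 'A' := by
    rw [PySem.List.pyGet?_eq_some_getElem cs hj0 (by rw [← hndef]; exact hjlt)] at hq
    simpa using hq
  have hjne : j ≠ pos % n := by
    intro h0
    have hd : n ∣ s * k := by
      have h' := Int.emod_eq_emod_iff_emod_sub_eq_zero.mp (hj ▸ h0 : (pos + s * k) % n = pos % n)
      have heq : pos + s * k - pos = s * k := by ring
      exact Int.dvd_of_emod_eq_zero (by rwa [heq] at h')
    have := Int.le_of_dvd (by omega) (dvd_of_smul n _ s hss hd)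
    omega
  have hkey : (s * (j - pos)) % n = k := by
    rw [hj, modkey2 n pos k s hss, Int.emod_eq_of_lt (by omega) h2]
  apply List.mem_map.mpr
  refine ⟨j, ?_, by show PySem.Int.mod (s * (j - pos)) n = k; rw [PySem.Int.mod_eq_emod_of_pos hn, hkey]⟩
  apply (mem_wdIdx cs pos j).mpr
  refine ⟨j.toNat, hjlen, hjnat, hcA, ?_⟩
  rw [← hjnat, PySem.Int.mod_eq_emod_of_pos hn]
  exact hjne

-- find? on a strictly increasing list returns a minimal satisfying element
theorem find?_min {l : List Int} {p : Int → Bool} {r : Int} (hl : l.Pairwise (· < ·))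
    (hf : l.find? p = some r) : ∀ j ∈ l, p j = true → r ≤ j := by
  obtain ⟨hpr, as, bs, rfl, hfail⟩ := List.find?_eq_some_iff_append.mp hf
  intro j hj hpj
  rcases List.mem_append.mp hj with hj | hj
  · exact absurd hpj (by simpa using hfail j hj)
  · rcases List.mem_cons.mp hj with rfl | hj
    · exact le_refl _
    · have := (List.pairwise_append.mp hl).2.1
      exact (List.rel_of_pairwise_cons this hj).le

-- central lemma: one directional scan of A equals the corresponding min of B
theorem central (cs : List Char) (pos s : Int) (hs : s = 1 ∨ s = -1) :
    ((PySem.List.pyRange 1 (PySem.List.len cs) 1).find? (wdQ cs pos s)).getD 0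
      = if wdIdx cs pos = [] then 0
        else (PySem.List.min?
          ((wdIdx cs pos).map (fun i => PySem.Int.mod (s * (i - pos)) (PySem.List.len cs)))
          (fun x => x)).getD 0 := by
  by_cases hidx : wdIdx cs pos = []
  · rw [if_pos hidx]
    have hnone : (PySem.List.pyRange 1 (PySem.List.len cs) 1).find? (wdQ cs pos s) = none := by
      rw [List.find?_eq_none]
      intro x hx hq
      obtain ⟨hx1, hx2⟩ := PySem.List.mem_pyRange_one.mp hx
      have := bridgeA cs pos s x hs hx1 hx2 hq
      rw [hidx] at this
      simp at this
    rw [hnone]; rfl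
  · rw [if_neg hidx]
    set L := (wdIdx cs pos).map (fun i => PySem.Int.mod (s * (i - pos)) (PySem.List.len cs)) with hL
    have hLne : L ≠ [] := by simpa [hL] using hidx
    obtain ⟨m, hm⟩ : ∃ m, PySem.List.min? L (fun x => x) = some m := by
      cases h : PySem.List.min? L (fun x => x) with
      | none => exact absurd ((PySem.List.min?_eq_none_iff L _).mp h) hLne
      | some m => exact ⟨m, rfl⟩
    have hmemL := PySem.List.min?_mem hm
    have hb := bridgeB cs pos s m hs hmemL
    have hmrange : m ∈ PySem.List.pyRange 1 (PySem.List.len cs) 1 :=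
      PySem.List.mem_pyRange_one.mpr ⟨hb.1.1, hb.1.2⟩
    obtain ⟨r, hr⟩ : ∃ r, (PySem.List.pyRange 1 (PySem.List.len cs) 1).find? (wdQ cs pos s) = some r := by
      cases h : (PySem.List.pyRange 1 (PySem.List.len cs) 1).find? (wdQ cs pos s) with
      | none => exact absurd hb.2 (List.find?_eq_none.mp h m hmrange)
      | some r => exact ⟨r, rfl⟩
    rw [hr, hm]
    have hrq := List.find?_some hr
    have hrmem := List.mem_of_find?_eq_some hr
    obtain ⟨hr1, hr2⟩ := PySem.List.mem_pyRange_one.mp hrmem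
    have h1 : r ≤ m := find?_min (PySem.List.pairwise_lt_pyRange_one 1 (PySem.List.len cs)) hr m hmrange hb.2
    have h2 : m ≤ r := PySem.List.min?_isMin hm r (bridgeA cs pos s r hs hr1 hr2 hrq)
    simp [le_antisymm h1 h2]

-- A's shifted scan over range(n-1) is the find? over distances 1..n-1
theorem scan_shift (cs : List Char) (pos s : Int) :
    wdScan cs (fun i => PySem.Int.mod (pos + s * (i + 1)) (PySem.List.len cs))
        (PySem.List.pyRange 0 (PySem.List.len cs - 1) 1)
      = ((PySem.List.pyRange 1 (PySem.List.len cs) 1).find? (wdQ cs pos s)).getD 0 := by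
  rw [wdScan_eq_find?]
  have hsh : PySem.List.pyRange 1 (PySem.List.len cs) 1
      = (PySem.List.pyRange 0 (PySem.List.len cs - 1) 1).map (· + 1) := by
    rw [PySem.List.pyRange_one, PySem.List.pyRange_one, List.map_map]
    have : (PySem.List.len cs - 1 - 0) = PySem.List.len cs - 1 := by ring
    rw [this]
    apply List.map_congr_left
    intro k _
    simp; ring
  rw [hsh, List.find?_map]
  rfl

-- ===== VERDICT (by name: the statement is the Claim_ definition above) =====
theorem word_distance_spec : Claim_equal_word_distance := by
  intro name pos _
  unfold Spec_word_distance word_distance word_distance_alt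
  dsimp only
  have e1 : (fun i => PySem.Int.mod (pos + i + 1) (PySem.List.len name.toList))
      = (fun i => PySem.Int.mod (pos + 1 * (i + 1)) (PySem.List.len name.toList)) := by
    funext i; congr 1; ring
  have e2 : (fun i => PySem.Int.mod (pos - i - 1) (PySem.List.len name.toList))
      = (fun i => PySem.Int.mod (pos + (-1) * (i + 1)) (PySem.List.len name.toList)) := by
    funext i; congr 1; ring
  have e3 : (fun i : Int => PySem.Int.mod (i - pos) (PySem.List.len name.toList))
      = (fun i => PySem.Int.mod (1 * (i - pos)) (PySem.List.len name.toList)) := by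
    funext i; congr 1; ring
  have e4 : (fun i : Int => PySem.Int.mod (pos - i) (PySem.List.len name.toList))
      = (fun i => PySem.Int.mod ((-1) * (i - pos)) (PySem.List.len name.toList)) := by
    funext i; congr 1; ring
  rw [e1, e2, e3, e4, scan_shift name.toList pos 1, scan_shift name.toList pos (-1),
    central name.toList pos 1 (Or.inl rfl), central name.toList pos (-1) (Or.inr rfl)]
  by_cases hidx : wdIdx name.toList pos = []
  · simp [hidx]
  · simp only [if_neg hidx]
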